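-- pv_equiv track=rewrite | github.com/SMART-Dal/Ansible-Reproducibility | smell_detection.py | check_task_for_hardware_specific_commands
-- ===== SOURCE A (Python) =====
-- def check_task_for_hardware_specific_commands(task_name, task):
--     messages = []
--
--     hardware_commands = ['lspci', 'lshw', 'lsblk', 'fdisk', 'parted', 'ip', 'ifconfig', 'route', 'fwupd', 'smbios-util',
--                          'mdadm', 'megacli', 'vconfig', 'tpmtool', 'efibootmgr', 'cpufrequtils', 'sysctl', 'powertop',
--                          'acpi', 'ifup', 'ifdown', 'iptables', 'mkfs', 'nvidia-settings', 'nvidia-smi', 'sg3_utils', 'multipath',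
--                          'mpstat', 'xinput', 'smbus-tools', 'lm-sensors']
--
--     task_name = task_name
--     for t in task:
--         for component in ['command', 'shell', 'raw']:
--             if component in t and any(hc in task[t] for hc in hardware_commands):
--
--                 if any(hc in task[t] for hc in ['lspci', 'lshw']):
--                     messages.append(f"Task '{task_name}' uses a hardware-specific command that may not be portable.")
--
--                 elif any(hc in task[t] for hc in ['lsblk', 'fdisk', 'parted', 'mkfs', 'sg3_utils', 'multipath']):
--                     messages.append(f"Task '{task_name}' uses a disk management command that may not be portable.")
--
--                 elif any(hc in task[t] for hc in ['ip', 'ifconfig', 'route', 'vconfig', 'ifup', 'ifdown', 'iptables']):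
--                     messages.append(f"Task '{task_name}' uses a network management command that may not be portable.")
--
--                 elif any(hc in task[t] for hc in ['fwupd', 'smbios-util']):
--                     messages.append(f"Task '{task_name}' uses a BIOS firmware management command that may not be portable.")
--
--                 elif any(hc in task[t] for hc in ['mdadm', 'megacli']):
--                     messages.append(f"Task '{task_name}' uses a RAID arrays management command that may not be portable.")
--
--                 elif any(hc in task[t] for hc in ['tpmtool', 'efibootmgr']):
--                     messages.append(f"Task '{task_name}' uses a security management command that may not be portable.")
--
--                 elif any(hc in task[t] for hc in ['cpufrequtils', 'sysctl']):
--                     messages.append(f"Task '{task_name}' uses a performance settings management command that may not be portable.")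
--
--                 elif any(hc in task[t] for hc in ['nvidia-settings', 'nvidia-smi']):
--                     messages.append(f"Task '{task_name}' uses a GPU settings management command that may not be portable.")
--
--                 elif any(hc in task[t] for hc in ['xinput','xrandr']):
--                     messages.append(f"Task '{task_name}' uses a I/O device management command that may not be portable.")
--
--                 elif any(hc in task[t] for hc in ['smbus-tools', 'lm-sensors']):
--                     messages.append(f"Task '{task_name}' uses a system management bus command that may not be portable.")
--
--     if messages:
--         return '\n'.join(messages)
--     else:
--         return f" Task '{task_name}' has not used hardware-specific commands."
-- ===== SOURCE B (Python) =====
-- def check_task_for_hardware_specific_commands(task_name, task):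
--     hardware_commands = ['lspci', 'lshw', 'lsblk', 'fdisk', 'parted', 'ip', 'ifconfig', 'route', 'fwupd', 'smbios-util',
--                          'mdadm', 'megacli', 'vconfig', 'tpmtool', 'efibootmgr', 'cpufrequtils', 'sysctl', 'powertop',
--                          'acpi', 'ifup', 'ifdown', 'iptables', 'mkfs', 'nvidia-settings', 'nvidia-smi', 'sg3_utils', 'multipath',
--                          'mpstat', 'xinput', 'smbus-tools', 'lm-sensors']
--
--     categories = [
--         (['lspci', 'lshw'], 'hardware-specific'),
--         (['lsblk', 'fdisk', 'parted', 'mkfs', 'sg3_utils', 'multipath'], 'disk management'),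
--         (['ip', 'ifconfig', 'route', 'vconfig', 'ifup', 'ifdown', 'iptables'], 'network management'),
--         (['fwupd', 'smbios-util'], 'BIOS firmware management'),
--         (['mdadm', 'megacli'], 'RAID arrays management'),
--         (['tpmtool', 'efibootmgr'], 'security management'),
--         (['cpufrequtils', 'sysctl'], 'performance settings management'),
--         (['nvidia-settings', 'nvidia-smi'], 'GPU settings management'),
--         (['xinput', 'xrandr'], 'I/O device management'),
--         (['smbus-tools', 'lm-sensors'], 'system management bus'),
--     ]
--
--     # flat hash index: command -> priority (category rank); replaces the ordered
--     # scan of the ladder by a min over the ranks of all matching commands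
--     cmd_rank = {c: k for k, (cmds, _) in enumerate(categories) for c in cmds}
--     labels = [label for _, label in categories]
--
--     def rank(value):
--         if not any(hc in value for hc in hardware_commands):
--             return None
--         hits = [k for c, k in cmd_rank.items() if c in value]
--         return min(hits) if hits else None
--
--     messages = [
--         f"Task '{task_name}' uses a {labels[k]} command that may not be portable."
--         for t in task
--         for comp in ('command', 'shell', 'raw')
--         if comp in t
--         for k in [rank(task[t])]
--         if k is not None
--     ]
--     return '\n'.join(messages) if messages else f" Task '{task_name}' has not used hardware-specific commands."
-- ===== Notes on version B (the rewrite author's own statement) =====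
-- stated objective: alternative
-- what changed: Replaces A's ten-branch if/elif ladder by a flat hash index mapping each category command to its category rank, classifying a value as the minimum rank among all matching commands (min over a hash-index filter instead of an ordered first-match scan), and builds the message list with a single flat comprehension instead of nested accumulator loops; correct because the ranks follow the ladder's order, so the least matching rank is exactly the first branch that fires.
import Mathlib
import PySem

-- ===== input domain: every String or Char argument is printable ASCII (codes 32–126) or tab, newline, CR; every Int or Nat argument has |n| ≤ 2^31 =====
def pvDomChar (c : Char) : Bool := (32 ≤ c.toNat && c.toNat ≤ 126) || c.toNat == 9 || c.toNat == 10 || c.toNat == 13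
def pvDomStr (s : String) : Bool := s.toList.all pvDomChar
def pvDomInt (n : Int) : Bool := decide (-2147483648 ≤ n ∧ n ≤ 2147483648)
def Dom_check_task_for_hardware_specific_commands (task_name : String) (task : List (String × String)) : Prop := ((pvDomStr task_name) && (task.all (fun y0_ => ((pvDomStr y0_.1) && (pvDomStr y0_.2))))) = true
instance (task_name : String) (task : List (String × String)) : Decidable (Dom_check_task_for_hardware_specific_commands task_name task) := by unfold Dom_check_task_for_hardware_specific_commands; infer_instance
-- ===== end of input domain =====

-- B replaces A's ten-branch if/elif ladder by a flat command→rank hash index with a min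
-- over the ranks of matching commands, and a flat comprehension instead of accumulator
-- loops (alternative decomposition, same cost).

-- ===== PORT A =====

def pvHardwareCommands : List String :=
  ["lspci", "lshw", "lsblk", "fdisk", "parted", "ip", "ifconfig", "route", "fwupd", "smbios-util",
   "mdadm", "megacli", "vconfig", "tpmtool", "efibootmgr", "cpufrequtils", "sysctl", "powertop",
   "acpi", "ifup", "ifdown", "iptables", "mkfs", "nvidia-settings", "nvidia-smi", "sg3_utils", "multipath",
   "mpstat", "xinput", "smbus-tools", "lm-sensors"]

-- the if/elif ladder of A, for one key's value v (gate already passed); appends to msgs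
def pvLadder (task_name v : String) (msgs : List String) : List String :=
  if (["lspci", "lshw"] : List String).any (fun hc => PySem.Str.isIn hc v) then
    msgs ++ ["Task '" ++ task_name ++ "' uses a hardware-specific command that may not be portable."]
  else if (["lsblk", "fdisk", "parted", "mkfs", "sg3_utils", "multipath"] : List String).any (fun hc => PySem.Str.isIn hc v) then
    msgs ++ ["Task '" ++ task_name ++ "' uses a disk management command that may not be portable."]
  else if (["ip", "ifconfig", "route", "vconfig", "ifup", "ifdown", "iptables"] : List String).any (fun hc => PySem.Str.isIn hc v) then
    msgs ++ ["Task '" ++ task_name ++ "' uses a network management command that may not be portable."]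
  else if (["fwupd", "smbios-util"] : List String).any (fun hc => PySem.Str.isIn hc v) then
    msgs ++ ["Task '" ++ task_name ++ "' uses a BIOS firmware management command that may not be portable."]
  else if (["mdadm", "megacli"] : List String).any (fun hc => PySem.Str.isIn hc v) then
    msgs ++ ["Task '" ++ task_name ++ "' uses a RAID arrays management command that may not be portable."]
  else if (["tpmtool", "efibootmgr"] : List String).any (fun hc => PySem.Str.isIn hc v) then
    msgs ++ ["Task '" ++ task_name ++ "' uses a security management command that may not be portable."]
  else if (["cpufrequtils", "sysctl"] : List String).any (fun hc => PySem.Str.isIn hc v) then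
    msgs ++ ["Task '" ++ task_name ++ "' uses a performance settings management command that may not be portable."]
  else if (["nvidia-settings", "nvidia-smi"] : List String).any (fun hc => PySem.Str.isIn hc v) then
    msgs ++ ["Task '" ++ task_name ++ "' uses a GPU settings management command that may not be portable."]
  else if (["xinput", "xrandr"] : List String).any (fun hc => PySem.Str.isIn hc v) then
    msgs ++ ["Task '" ++ task_name ++ "' uses a I/O device management command that may not be portable."]
  else if (["smbus-tools", "lm-sensors"] : List String).any (fun hc => PySem.Str.isIn hc v) then
    msgs ++ ["Task '" ++ task_name ++ "' uses a system management bus command that may not be portable."]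
  else msgs

def check_task_for_hardware_specific_commands (task_name : String) (task : List (String × String)) : String :=
  let d := PySem.Dict.ofList task
  let msgs : List String :=
    d.keys.foldl (fun msgs t =>
      (["command", "shell", "raw"] : List String).foldl (fun msgs component =>
        if PySem.Str.isIn component t
            && pvHardwareCommands.any (fun hc => PySem.Str.isIn hc (d.getD t "")) then
          pvLadder task_name (d.getD t "") msgs
        else msgs) msgs) []
  if msgs.isEmpty then " Task '" ++ task_name ++ "' has not used hardware-specific commands."
  else PySem.Str.join "\n" msgs

-- ===== PORT B =====

def pvCategories : List (List String × String) :=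
  [(["lspci", "lshw"], "hardware-specific"),
   (["lsblk", "fdisk", "parted", "mkfs", "sg3_utils", "multipath"], "disk management"),
   (["ip", "ifconfig", "route", "vconfig", "ifup", "ifdown", "iptables"], "network management"),
   (["fwupd", "smbios-util"], "BIOS firmware management"),
   (["mdadm", "megacli"], "RAID arrays management"),
   (["tpmtool", "efibootmgr"], "security management"),
   (["cpufrequtils", "sysctl"], "performance settings management"),
   (["nvidia-settings", "nvidia-smi"], "GPU settings management"),
   (["xinput", "xrandr"], "I/O device management"),
   (["smbus-tools", "lm-sensors"], "system management bus")]

-- {c: k for k, (cmds, _) in enumerate(categories) for c in cmds}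
def pvCmdRank : PySem.Dict String Int :=
  PySem.Dict.ofList ((PySem.List.enumerate pvCategories 0).flatMap (fun e => e.2.1.map (fun c => (c, e.1))))

-- [label for _, label in categories]
def pvLabels : List String := pvCategories.map (·.2)

-- rank(value): 'min(hits) if hits else None' is exactly PySem.List.min? (none on [])
def pvRank (v : String) : Option Int :=
  if !(pvHardwareCommands.any (fun hc => PySem.Str.isIn hc v)) then none
  else
    let hits := (pvCmdRank.items.filter (fun e => PySem.Str.isIn e.1 v)).map (·.2)
    PySem.List.min? hits (fun x => x)

def check_task_for_hardware_specific_commands_alt (task_name : String) (task : List (String × String)) : String :=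
  let d := PySem.Dict.ofList task
  let msgs : List String :=
    d.keys.flatMap (fun t =>
      (["command", "shell", "raw"] : List String).flatMap (fun comp =>
        if PySem.Str.isIn comp t then
          match pvRank (d.getD t "") with
          | some k => ["Task '" ++ task_name ++ "' uses a " ++ PySem.List.pyGetD pvLabels k "" ++ " command that may not be portable."]
          | none => []
        else []))
  if msgs.isEmpty then " Task '" ++ task_name ++ "' has not used hardware-specific commands."
  else PySem.Str.join "\n" msgs

-- ===== PRECONDITION & SPEC =====
def Spec_check_task_for_hardware_specific_commands (task_name : String) (task : List (String × String)) (out : String) : Prop := out = check_task_for_hardware_specific_commands_alt task_name task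
instance (task_name : String) (task : List (String × String)) (out : String) : Decidable (Spec_check_task_for_hardware_specific_commands task_name task out) := by unfold Spec_check_task_for_hardware_specific_commands; infer_instance

-- ===== CLAIM (what is proved, stated in full; the proofs are below) =====
def Claim_equal_check_task_for_hardware_specific_commands : Prop := ∀ (task_name : String) (task : List (String × String)), Dom_check_task_for_hardware_specific_commands task_name task → Spec_check_task_for_hardware_specific_commands task_name task (check_task_for_hardware_specific_commands task_name task)

-- ===== LEMMAS AND PROOFS =====

-- helpers below the claim block: used only by the proofs

-- Python's min lifted to Option (for splitting min over list concatenation)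
def pvOmin (a b : Option Int) : Option Int :=
  match a, b with
  | none, b => b
  | some x, none => some x
  | some x, some y => some (min x y)

theorem pv_foldl_min_comm (ys : List Int) (m y : Int) :
    List.foldl min (min m y) ys = min m (List.foldl min y ys) := by
  induction ys generalizing y with
  | nil => rfl
  | cons z u ih => simp only [List.foldl, min_assoc, ih]

theorem pv_min_append (xs ys : List Int) :
    PySem.List.min? (xs ++ ys) (fun y => y) =
      pvOmin (PySem.List.min? xs (fun y => y)) (PySem.List.min? ys (fun y => y)) := by
  cases xs with
  | nil => cases ys <;> simp [PySem.List.min?, pvOmin]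
  | cons x t =>
    rw [List.cons_append, PySem.List.min?_id_cons, PySem.List.min?_id_cons]
    cases ys with
    | nil => simp [PySem.List.min?, pvOmin]
    | cons y u =>
      rw [PySem.List.min?_id_cons]
      simp only [pvOmin, List.foldl_append, List.foldl, pv_foldl_min_comm]

theorem pv_foldl_min_const (l : List String) (k : Int) :
    List.foldl min k (l.map (fun _ => k)) = k := by
  induction l with
  | nil => rfl
  | cons a t ih => simpa [List.foldl] using ih

theorem pv_chunk (cmds : List String) (p : String → Bool) (k : Int) :
    PySem.List.min? ((cmds.filter p).map (fun _ => k)) (fun y => y) =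
      if cmds.any p then some k else none := by
  rcases h : cmds.filter p with _ | ⟨a, l⟩
  · have : cmds.any p = false := by
      rw [List.any_eq_false]
      intro x hx
      have := List.filter_eq_nil_iff.mp h x hx
      simpa using this
    simp [this, PySem.List.min?]
  · have ha : a ∈ cmds.filter p := by rw [h]; exact List.mem_cons_self
    have : cmds.any p = true := by
      rw [List.any_eq_true]
      exact ⟨a, List.mem_of_mem_filter ha, List.of_mem_filter ha⟩
    rw [this]
    simp only [List.map_cons, PySem.List.min?_id_cons, pv_foldl_min_const, if_true]

def pvPairs : List (String × Int) :=
  ((["lspci", "lshw"] : List String).map (fun c => (c, (0 : Int))) ++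
  ((["lsblk", "fdisk", "parted", "mkfs", "sg3_utils", "multipath"] : List String).map (fun c => (c, (1 : Int))) ++
  ((["ip", "ifconfig", "route", "vconfig", "ifup", "ifdown", "iptables"] : List String).map (fun c => (c, (2 : Int))) ++
  ((["fwupd", "smbios-util"] : List String).map (fun c => (c, (3 : Int))) ++
  ((["mdadm", "megacli"] : List String).map (fun c => (c, (4 : Int))) ++
  ((["tpmtool", "efibootmgr"] : List String).map (fun c => (c, (5 : Int))) ++
  ((["cpufrequtils", "sysctl"] : List String).map (fun c => (c, (6 : Int))) ++
  ((["nvidia-settings", "nvidia-smi"] : List String).map (fun c => (c, (7 : Int))) ++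
  ((["xinput", "xrandr"] : List String).map (fun c => (c, (8 : Int))) ++
  (["smbus-tools", "lm-sensors"] : List String).map (fun c => (c, (9 : Int))))))))))))

theorem pv_chunk' (cmds : List String) (v : String) (k : Int) :
    PySem.List.min? (List.map (fun x => x.2)
        (List.filter (fun e => PySem.Str.isIn e.1 v) (cmds.map (fun c => (c, k))))) (fun y => y) =
      if cmds.any (fun hc => PySem.Str.isIn hc v) then some k else none := by
  rw [List.filter_map, List.map_map]
  exact pv_chunk cmds _ k

theorem pv_items : pvCmdRank.items = pvPairs := by decide

theorem pv_omin_chain : ∀ (b0 b1 b2 b3 b4 b5 b6 b7 b8 b9 : Bool),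
    pvOmin (if b0 then some (0:Int) else none) (pvOmin (if b1 then some 1 else none)
      (pvOmin (if b2 then some 2 else none) (pvOmin (if b3 then some 3 else none)
      (pvOmin (if b4 then some 4 else none) (pvOmin (if b5 then some 5 else none)
      (pvOmin (if b6 then some 6 else none) (pvOmin (if b7 then some 7 else none)
      (pvOmin (if b8 then some 8 else none) (if b9 then some 9 else none))))))))) =
    (if b0 then some 0 else if b1 then some 1 else if b2 then some 2 else if b3 then some 3
     else if b4 then some 4 else if b5 then some 5 else if b6 then some 6 else if b7 then some 7
     else if b8 then some 8 else if b9 then some 9 else none) := by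
  decide

theorem pv_rank_eq (v : String)
    (hgate : pvHardwareCommands.any (fun hc => PySem.Str.isIn hc v) = true) :
    pvRank v =
      (if (["lspci", "lshw"] : List String).any (fun hc => PySem.Str.isIn hc v) then some 0
       else if (["lsblk", "fdisk", "parted", "mkfs", "sg3_utils", "multipath"] : List String).any (fun hc => PySem.Str.isIn hc v) then some 1
       else if (["ip", "ifconfig", "route", "vconfig", "ifup", "ifdown", "iptables"] : List String).any (fun hc => PySem.Str.isIn hc v) then some 2
       else if (["fwupd", "smbios-util"] : List String).any (fun hc => PySem.Str.isIn hc v) then some 3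
       else if (["mdadm", "megacli"] : List String).any (fun hc => PySem.Str.isIn hc v) then some 4
       else if (["tpmtool", "efibootmgr"] : List String).any (fun hc => PySem.Str.isIn hc v) then some 5
       else if (["cpufrequtils", "sysctl"] : List String).any (fun hc => PySem.Str.isIn hc v) then some 6
       else if (["nvidia-settings", "nvidia-smi"] : List String).any (fun hc => PySem.Str.isIn hc v) then some 7
       else if (["xinput", "xrandr"] : List String).any (fun hc => PySem.Str.isIn hc v) then some 8
       else if (["smbus-tools", "lm-sensors"] : List String).any (fun hc => PySem.Str.isIn hc v) then some 9
       else none) := by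
  unfold pvRank
  rw [hgate]
  rw [← pv_omin_chain]
  simp only [Bool.not_true, Bool.false_eq_true, if_false, pv_items, pvPairs]
  rw [List.filter_append, List.map_append, pv_min_append, pv_chunk']
  rw [List.filter_append, List.map_append, pv_min_append, pv_chunk']
  rw [List.filter_append, List.map_append, pv_min_append, pv_chunk']
  rw [List.filter_append, List.map_append, pv_min_append, pv_chunk']
  rw [List.filter_append, List.map_append, pv_min_append, pv_chunk']
  rw [List.filter_append, List.map_append, pv_min_append, pv_chunk']
  rw [List.filter_append, List.map_append, pv_min_append, pv_chunk']
  rw [List.filter_append, List.map_append, pv_min_append, pv_chunk']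
  rw [List.filter_append, List.map_append, pv_min_append, pv_chunk', pv_chunk']

set_option maxHeartbeats 800000 in
theorem pv_main (task_name v : String) (msgs : List String)
    (hgate : pvHardwareCommands.any (fun hc => PySem.Str.isIn hc v) = true) :
    pvLadder task_name v msgs =
      msgs ++ (match pvRank v with
        | some k => ["Task '" ++ task_name ++ "' uses a " ++ PySem.List.pyGetD pvLabels k "" ++ " command that may not be portable."]
        | none => []) := by
  unfold pvLadder
  rw [pv_rank_eq v hgate]
  split_ifs <;> simp [pvLabels, pvCategories, String.append_assoc] <;> decide

-- one key's inner 3-iteration loop of A equals B's inner flatMap for that key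
theorem pv_step (task_name t v : String) (msgs : List String) :
    (["command", "shell", "raw"] : List String).foldl (fun msgs component =>
        if PySem.Str.isIn component t
            && pvHardwareCommands.any (fun hc => PySem.Str.isIn hc v) then
          pvLadder task_name v msgs
        else msgs) msgs =
      msgs ++ (["command", "shell", "raw"] : List String).flatMap (fun comp =>
        if PySem.Str.isIn comp t then
          match pvRank v with
          | some k => ["Task '" ++ task_name ++ "' uses a " ++ PySem.List.pyGetD pvLabels k "" ++ " command that may not be portable."]
          | none => []
        else []) := by
  by_cases hgate : pvHardwareCommands.any (fun hc => PySem.Str.isIn hc v) = true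
  · simp only [List.foldl, List.flatMap_cons, List.flatMap_nil, hgate, Bool.and_true,
      pv_main task_name v _ hgate]
    cases hr : pvRank v with
    | none =>
      cases PySem.Str.isIn "command" t <;> cases PySem.Str.isIn "shell" t <;>
        cases PySem.Str.isIn "raw" t <;> simp
    | some k =>
      cases PySem.Str.isIn "command" t <;> cases PySem.Str.isIn "shell" t <;>
        cases PySem.Str.isIn "raw" t <;> simp
  · have hg : (pvHardwareCommands.any fun hc => PySem.Str.isIn hc v) = false := by
      revert hgate
      cases pvHardwareCommands.any fun hc => PySem.Str.isIn hc v <;> simp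
    have hr : pvRank v = none := by
      unfold pvRank
      rw [hg]
      rfl
    have hex : ¬ ∃ x ∈ pvHardwareCommands, PySem.Chars.isIn x.toList v.toList = true := by
      simpa [List.any_eq_true, PySem.Str.isIn] using hg
    simp [List.foldl, hr, hex]

-- ===== VERDICT (by name: the statement is the Claim_ definition above) =====
theorem check_task_for_hardware_specific_commands_spec : Claim_equal_check_task_for_hardware_specific_commands := by
  intro task_name task _
  unfold Spec_check_task_for_hardware_specific_commands
  unfold check_task_for_hardware_specific_commands check_task_for_hardware_specific_commands_alt
  simp only []
  refine congrArg
    (fun msgs : List String =>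
      if msgs.isEmpty then " Task '" ++ task_name ++ "' has not used hardware-specific commands."
      else PySem.Str.join "\n" msgs) ?_
  rw [PySem.List.foldl_congr_mem _ _
      (fun msgs t => msgs ++ (["command", "shell", "raw"] : List String).flatMap (fun comp =>
        if PySem.Str.isIn comp t then
          match pvRank ((PySem.Dict.ofList task).getD t "") with
          | some k => ["Task '" ++ task_name ++ "' uses a " ++ PySem.List.pyGetD pvLabels k "" ++ " command that may not be portable."]
          | none => []
        else [])) []
      (fun msgs t _ => pv_step task_name t ((PySem.Dict.ofList task).getD t "") msgs),
    PySem.List.foldl_append_eq_flatMap]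
  rw [List.nil_append]
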